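-- pv_equiv track=rewrite | github.com/pypi-data/pypi-mirror-336 | packages/biomapper/biomapper-0.5.2.tar.gz/biomapper-0.5.2/biomapper/standardization/ramp_client.py | find_pathway_overlaps
-- ===== SOURCE A (Python) =====
-- from collections import defaultdict
-- from typing import Any
--
-- def find_pathway_overlaps(pathways_data: dict[str, Any]) -> dict[str, int]:
--     """Find overlapping pathways in response data."""
--     if "result" not in pathways_data:
--         return {}
--
--     pathway_counts = defaultdict(set)
--
--     # Count analytes per pathway
--     for pathway in pathways_data["result"]:
--         name = pathway["pathwayName"]
--         analyte_id = pathway["inputId"]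
--         pathway_counts[name].add(analyte_id)
--
--     # Convert sets to counts
--     return {name: len(analytes) for name, analytes in pathway_counts.items()}
-- ===== SOURCE B (Python) =====
-- from collections import Counter
--
--
-- def find_pathway_overlaps(pathways_data):
--     """Find overlapping pathways in response data."""
--     if "result" not in pathways_data:
--         return {}
--
--     # Staged pipeline: materialise the (name, id) pairs, dedupe them in
--     # first-occurrence order with dict.fromkeys, then count the names.
--     pairs = [(p["pathwayName"], p["inputId"]) for p in pathways_data["result"]]
--     unique_names = [name for name, _ in dict.fromkeys(pairs)]
--     return dict(Counter(unique_names))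
-- ===== Notes on version B (the rewrite author's own statement) =====
-- stated objective: alternative
-- what changed: A makes one pass accumulating a dict of per-pathway id-sets and then maps each set to its size; B is a staged pipeline with no per-pathway accumulator: it first materialises the flat list of (pathwayName, inputId) pairs, dedupes that list in first-occurrence order with dict.fromkeys, and finally counts the surviving names with Counter.
import Mathlib
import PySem

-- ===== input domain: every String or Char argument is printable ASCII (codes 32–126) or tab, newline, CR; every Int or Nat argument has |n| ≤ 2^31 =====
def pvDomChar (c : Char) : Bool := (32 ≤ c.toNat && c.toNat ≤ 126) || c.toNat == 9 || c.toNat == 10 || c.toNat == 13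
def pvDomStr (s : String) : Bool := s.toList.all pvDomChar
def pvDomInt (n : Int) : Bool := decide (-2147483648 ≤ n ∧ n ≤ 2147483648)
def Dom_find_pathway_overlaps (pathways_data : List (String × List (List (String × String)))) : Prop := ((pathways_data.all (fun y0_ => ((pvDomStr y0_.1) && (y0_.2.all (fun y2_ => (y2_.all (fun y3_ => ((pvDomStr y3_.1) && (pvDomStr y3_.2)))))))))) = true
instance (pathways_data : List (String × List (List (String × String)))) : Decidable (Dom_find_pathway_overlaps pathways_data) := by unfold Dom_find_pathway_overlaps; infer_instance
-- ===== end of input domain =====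

-- B replaces A's one-pass dict-of-sets accumulation by a staged pipeline: list the
-- (name, id) pairs, dedupe them in first-occurrence order, then count names (objective: alternative).

-- ===== PORT A =====
def find_pathway_overlaps (pathways_data : List (String × List (List (String × String)))) : List (String × Int) :=
  match (PySem.Dict.mk pathways_data).get? "result" with
  | none => []
  | some result =>
    let pathway_counts := result.foldl
      (fun (d : PySem.Dict String (PySem.Set String)) pathway =>
        match (PySem.Dict.mk pathway).get? "pathwayName", (PySem.Dict.mk pathway).get? "inputId" with
        | some name, some analyte_id => d.insert name (PySem.Set.add (d.getD name []) analyte_id)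
        | _, _ => d)  -- Python raises KeyError here; excluded by Pre_
      PySem.Dict.empty
    pathway_counts.items.map (fun p => (p.1, (p.2.length : Int)))

-- ===== PORT B =====
def find_pathway_overlaps_alt (pathways_data : List (String × List (List (String × String)))) : List (String × Int) :=
  match (PySem.Dict.mk pathways_data).get? "result" with
  | some result =>
    let pairs := result.map (fun pathway =>
      match (PySem.Dict.mk pathway).get? "pathwayName" with
      | some name =>
        match (PySem.Dict.mk pathway).get? "inputId" with
        | some analyte_id => (name, analyte_id)
        | none => ("", "")  -- Python raises KeyError here; excluded by Pre_
      | none => ("", ""))  -- Python raises KeyError here; excluded by Pre_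
    let unique_names := (PySem.List.dedup pairs).map Prod.fst
    (PySem.Dict.counter unique_names).items
  | none => []

-- ===== PRECONDITION & SPEC =====
-- Pre_ excludes exactly the inputs on which Python A raises KeyError: a pathway record
-- under "result" missing the "pathwayName" or "inputId" key.
def Pre_find_pathway_overlaps (pathways_data : List (String × List (List (String × String)))) : Prop :=
  (((PySem.Dict.mk pathways_data).get? "result").getD []).all
    (fun pw => (PySem.Dict.mk pw).contains "pathwayName" && (PySem.Dict.mk pw).contains "inputId") = true
instance (pathways_data : List (String × List (List (String × String)))) : Decidable (Pre_find_pathway_overlaps pathways_data) := by unfold Pre_find_pathway_overlaps; infer_instance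

def pvWitness_find_pathway_overlaps : (List (String × List (List (String × String)))) :=
  [("result", [[("pathwayName", "glycolysis"), ("inputId", "hmdb:1")],
               [("pathwayName", "glycolysis"), ("inputId", "hmdb:2")]])]

def Spec_find_pathway_overlaps (pathways_data : List (String × List (List (String × String)))) (out : List (String × Int)) : Prop := out = find_pathway_overlaps_alt pathways_data
instance (pathways_data : List (String × List (List (String × String)))) (out : List (String × Int)) : Decidable (Spec_find_pathway_overlaps pathways_data out) := by unfold Spec_find_pathway_overlaps; infer_instance

-- ===== CLAIM (what is proved, stated in full; the proofs are below) =====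
def Claim_equal_find_pathway_overlaps : Prop := ∀ (pathways_data : List (String × List (List (String × String)))), Dom_find_pathway_overlaps pathways_data → Pre_find_pathway_overlaps pathways_data → Spec_find_pathway_overlaps pathways_data (find_pathway_overlaps pathways_data)

-- ===== LEMMAS AND PROOFS =====

-- proof-only helpers: A's loop step, and the grouping A's loop computes
def pvStepA (d : PySem.Dict String (PySem.Set String)) (q : String × String) : PySem.Dict String (PySem.Set String) :=
  d.insert q.1 (PySem.Set.add (d.getD q.1 []) q.2)

def pvIds (n : String) (ps : List (String × String)) : PySem.Set String :=
  PySem.Set.ofList ((ps.filter (fun q => q.1 == n)).map Prod.snd)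

def pvGroup (ps : List (String × String)) : List (String × PySem.Set String) :=
  (PySem.Set.ofList (ps.map Prod.fst)).map (fun n => (n, pvIds n ps))

-- appending one element to the list a set is built from is one Set.add
theorem pv_ofList_snoc {α : Type} [BEq α] (l : List α) (a : α) :
    PySem.Set.ofList (l ++ [a]) = PySem.Set.add (PySem.Set.ofList l) a := by
  simp [PySem.Set.ofList, List.foldl_append]

-- a name occurs among the deduplicated pairs' names iff it occurs among the raw names
theorem pv_mem_names (ps : List (String × String)) (n : String) :
    n ∈ (PySem.Set.ofList ps).map Prod.fst ↔ n ∈ ps.map Prod.fst := by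
  simp only [List.mem_map]
  constructor
  · rintro ⟨q, hq, rfl⟩; exact ⟨q, (PySem.Set.mem_ofList ps q).mp hq, rfl⟩
  · rintro ⟨q, hq, rfl⟩; exact ⟨q, (PySem.Set.mem_ofList ps q).mpr hq, rfl⟩

theorem pv_mem_pvIds (ps : List (String × String)) (n a : String) :
    a ∈ pvIds n ps ↔ (n, a) ∈ ps := by
  unfold pvIds
  rw [PySem.Set.mem_ofList]
  simp only [List.mem_map, List.mem_filter]
  constructor
  · rintro ⟨⟨m, b⟩, ⟨hq, he⟩, rfl⟩
    simp only [beq_iff_eq] at he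
    subst he; exact hq
  · intro h; exact ⟨(n, a), ⟨h, by simp⟩, rfl⟩

theorem pv_filter_snoc (ps : List (String × String)) (n a m : String) :
    (ps ++ [(n, a)]).filter (fun q => q.1 == m)
      = ps.filter (fun q => q.1 == m) ++ (if n = m then [(n, a)] else []) := by
  rw [List.filter_append]
  by_cases h : n = m <;> simp [h]

theorem pv_pvIds_snoc (ps : List (String × String)) (n a m : String) :
    pvIds m (ps ++ [(n, a)]) = if n = m then PySem.Set.add (pvIds m ps) a else pvIds m ps := by
  unfold pvIds
  rw [pv_filter_snoc]
  by_cases h : n = m <;> simp [h, pv_ofList_snoc]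

-- looking up a key in the grouping dict
theorem pv_find?_beq (L : List String) (n : String) :
    L.find? (fun m => m == n) = if n ∈ L then some n else none := by
  induction L with
  | nil => simp
  | cons m t ih =>
    by_cases hm : m = n
    · subst hm; simp
    · have hb : (m == n) = false := by simp [hm]
      have hnm : ¬ n = m := fun h => hm h.symm
      simp [hb, ih, List.mem_cons, hnm]

theorem pv_get?_mk_group (ps : List (String × String)) (n : String) :
    (PySem.Dict.mk (pvGroup ps)).get? n
      = if n ∈ ps.map Prod.fst then some (pvIds n ps) else none := by
  have h1 : (PySem.Dict.mk (pvGroup ps)).get? n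
      = ((PySem.Set.ofList (ps.map Prod.fst)).find? (fun m => m == n)).map (fun m => pvIds m ps) := by
    simp [PySem.Dict.get?, pvGroup, List.find?_map, Function.comp_def, Option.map_map]
  rw [h1, pv_find?_beq]
  by_cases hn : n ∈ ps.map Prod.fst
  · rw [if_pos ((PySem.Set.mem_ofList _ n).mpr hn), if_pos hn]; rfl
  · rw [if_neg (fun h => hn ((PySem.Set.mem_ofList _ n).mp h)), if_neg hn]; rfl

-- the grouping after one more pair, in closed form
theorem pv_group_snoc_mem (ps : List (String × String)) (n a : String)
    (hn : n ∈ ps.map Prod.fst) :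
    pvGroup (ps ++ [(n, a)])
      = (pvGroup ps).map (fun p => if (p.1 == n) = true then (n, PySem.Set.add (pvIds n ps) a) else p) := by
  unfold pvGroup
  rw [List.map_append, List.map_cons, List.map_nil, pv_ofList_snoc,
    PySem.Set.add_of_mem ((PySem.Set.mem_ofList _ n).mpr hn), List.map_map]
  apply List.map_congr_left
  intro m _hm
  by_cases hmn : m = n
  · subst hmn
    simp [pv_pvIds_snoc]
  · have hnm : ¬ n = m := fun h => hmn h.symm
    simp [pv_pvIds_snoc, hnm, hmn]

theorem pv_group_snoc_not_mem (ps : List (String × String)) (n a : String)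
    (hn : n ∉ ps.map Prod.fst) :
    pvGroup (ps ++ [(n, a)]) = pvGroup ps ++ [(n, PySem.Set.add (pvIds n ps) a)] := by
  unfold pvGroup
  rw [List.map_append, List.map_cons, List.map_nil, pv_ofList_snoc,
    PySem.Set.add_of_not_mem (fun h => hn ((PySem.Set.mem_ofList _ n).mp h)),
    List.map_append, List.map_cons, List.map_nil]
  congr 1
  · apply List.map_congr_left
    intro m hm
    have hm' : m ∈ ps.map Prod.fst := (PySem.Set.mem_ofList _ m).mp hm
    have hmn : ¬ n = m := fun h => hn (h ▸ hm')
    rw [pv_pvIds_snoc, if_neg hmn]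
  · rw [pv_pvIds_snoc, if_pos rfl]

-- A's fold from empty computes exactly the grouping pvGroup
theorem pv_foldA_group (ps : List (String × String)) :
    (ps.foldl pvStepA PySem.Dict.empty).items = pvGroup ps := by
  induction ps using List.reverseRecOn with
  | nil => rfl
  | append_singleton ps q ih =>
    obtain ⟨n, a⟩ := q
    rw [List.foldl_append, List.foldl_cons, List.foldl_nil,
      PySem.Dict.ext (y := PySem.Dict.mk (pvGroup ps)) ih]
    unfold pvStepA
    by_cases hn : n ∈ ps.map Prod.fst
    · have hget : (PySem.Dict.mk (pvGroup ps)).get? n = some (pvIds n ps) := by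
        rw [pv_get?_mk_group, if_pos hn]
      have hcont : (PySem.Dict.mk (pvGroup ps)).contains n = true := by
        rw [PySem.Dict.contains_eq_isSome_get?, hget]; rfl
      rw [show ((PySem.Dict.mk (pvGroup ps)).getD (n, a).1 []) = pvIds n ps from
          PySem.Dict.getD_of_get?_eq_some _ _ hget,
        PySem.Dict.items_insert_of_contains _ _ hcont, pv_group_snoc_mem ps n a hn]
    · have hget : (PySem.Dict.mk (pvGroup ps)).get? n = none := by
        rw [pv_get?_mk_group, if_neg hn]
      have hcont : (PySem.Dict.mk (pvGroup ps)).contains n = false := by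
        rw [PySem.Dict.contains_eq_isSome_get?, hget]; rfl
      have hfilter : ps.filter (fun q => q.1 == n) = [] := by
        rw [List.filter_eq_nil_iff]
        rintro ⟨m, b⟩ hq hb
        exact hn (List.mem_map.mpr ⟨(m, b), hq, by simpa using hb⟩)
      have hgd : (PySem.Dict.mk (pvGroup ps)).getD (n, a).1 [] = pvIds n ps := by
        rw [PySem.Dict.getD_of_not_contains _ _ hcont]
        unfold pvIds
        rw [hfilter]
        rfl
      rw [hgd, PySem.Dict.items_insert_of_not_contains _ _ hcont,
        pv_group_snoc_not_mem ps n a hn]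

-- the length image of the grouping equals the dedup-then-count pipeline of B
theorem pv_main (ps : List (String × String)) :
    (pvGroup ps).map (fun p => (p.1, (p.2.length : Int)))
      = List.map (fun k => (k, ((List.count k ((PySem.Set.ofList ps).map Prod.fst)) : Int)))
          (PySem.Set.ofList ((PySem.Set.ofList ps).map Prod.fst)) := by
  induction ps using List.reverseRecOn with
  | nil => rfl
  | append_singleton ps q ih =>
    obtain ⟨n, a⟩ := q
    by_cases h1 : (n, a) ∈ ps
    · -- duplicate pair: nothing changes on either side
      have hmem : (n, a) ∈ PySem.Set.ofList ps := (PySem.Set.mem_ofList _ _).mpr h1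
      have hadd : PySem.Set.add (pvIds n ps) a = pvIds n ps :=
        PySem.Set.add_of_mem ((pv_mem_pvIds ps n a).mpr h1)
      rw [pv_group_snoc_mem ps n a (List.mem_map.mpr ⟨(n, a), h1, rfl⟩),
        pv_ofList_snoc, PySem.Set.add_of_mem hmem, List.map_map]
      rw [List.map_congr_left (g := fun p : String × PySem.Set String => (p.1, (p.2.length : Int))) ?_]
      · exact ih
      · rintro p hp
        obtain ⟨m, _hm, rfl⟩ := List.mem_map.mp hp
        by_cases hmn : m = n
        · subst hmn
          simp [Function.comp, hadd]
        · simp [Function.comp, hmn]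
    · -- genuinely new pair
      have hofsnoc : PySem.Set.ofList (ps ++ [(n, a)]) = PySem.Set.ofList ps ++ [(n, a)] := by
        rw [pv_ofList_snoc]
        exact PySem.Set.add_of_not_mem (fun h => h1 ((PySem.Set.mem_ofList _ _).mp h))
      -- ih, normalised to two maps over the same name list
      have hL : PySem.Set.ofList (ps.map Prod.fst)
          = PySem.Set.ofList ((PySem.Set.ofList ps).map Prod.fst) := by
        have h := congrArg (List.map Prod.fst) ih
        simpa [pvGroup, List.map_map, Function.comp_def] using h
      have ih' : List.map (fun m => (m, ((pvIds m ps).length : Int))) (PySem.Set.ofList (ps.map Prod.fst))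
          = List.map (fun k => (k, ((List.count k ((PySem.Set.ofList ps).map Prod.fst)) : Int)))
              (PySem.Set.ofList (ps.map Prod.fst)) := by
        have h := ih
        rw [← hL] at h
        rw [show (pvGroup ps).map (fun p => (p.1, (p.2.length : Int)))
            = List.map (fun m => (m, ((pvIds m ps).length : Int))) (PySem.Set.ofList (ps.map Prod.fst)) from by
          unfold pvGroup; rw [List.map_map]; rfl] at h
        exact h
      have hpt : ∀ m ∈ PySem.Set.ofList (ps.map Prod.fst),
          ((pvIds m ps).length : Int) = (List.count m ((PySem.Set.ofList ps).map Prod.fst) : Int) := by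
        intro m hm
        have h := List.map_inj_left.mp ih' m hm
        exact ((Prod.mk.injEq _ _ _ _).mp h).2
      simp only [hofsnoc, List.map_append, List.map_cons, List.map_nil]
      by_cases h2 : n ∈ ps.map Prod.fst
      · -- name already known: both name lists collapse, the count for n grows by one
        have hnnames : n ∈ (PySem.Set.ofList ps).map Prod.fst := (pv_mem_names ps n).mpr h2
        rw [pv_group_snoc_mem ps n a h2, List.map_map,
          pv_ofList_snoc, PySem.Set.add_of_mem ((PySem.Set.mem_ofList _ n).mpr hnnames)]
        unfold pvGroup
        rw [List.map_map, ← hL]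
        apply List.map_inj_left.mpr
        intro m hm
        have hptm := hpt m hm
        by_cases hmn : m = n
        · subst hmn
          have hnotin : a ∉ pvIds m ps := fun h => h1 ((pv_mem_pvIds ps m a).mp h)
          simp only [Function.comp_apply, beq_self_eq_true, if_true,
            PySem.Set.add_of_not_mem hnotin, List.length_append, List.count_append,
            List.count_singleton, List.length_cons, List.length_nil, Prod.mk.injEq, true_and]
          all_goals push_cast
          all_goals omega
        · have hb : (m == n) = false := by simp [hmn]
          have hnm : ¬ n = m := fun h => hmn h.symm
          have hb' : (n == m) = false := by simp [hnm]
          simp only [Function.comp_apply, hb, Bool.false_eq_true, if_false,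
            List.count_append, List.count_singleton, hb', Prod.mk.injEq, true_and]
          all_goals push_cast
          all_goals omega
      · -- brand-new name: one entry with count 1 is appended on both sides
        have hnnames : n ∉ (PySem.Set.ofList ps).map Prod.fst := fun h => h2 ((pv_mem_names ps n).mp h)
        rw [pv_group_snoc_not_mem ps n a h2, List.map_append, List.map_cons, List.map_nil,
          pv_ofList_snoc, PySem.Set.add_of_not_mem (fun h => hnnames ((PySem.Set.mem_ofList _ n).mp h)),
          List.map_append, List.map_cons, List.map_nil]
        congr 1
        · unfold pvGroup
          rw [List.map_map, ← hL]
          apply List.map_inj_left.mpr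
          intro m hm
          have hptm := hpt m hm
          have hmn : ¬ n = m := fun h => h2 (h ▸ (PySem.Set.mem_ofList _ m).mp hm)
          have hb' : (n == m) = false := by simp [hmn]
          simp only [Function.comp_apply, List.count_append, List.count_singleton, hb',
            Bool.false_eq_true, if_false, Prod.mk.injEq, true_and]
          all_goals push_cast
          all_goals omega
        · have hfilter : ps.filter (fun q => q.1 == n) = [] := by
            rw [List.filter_eq_nil_iff]
            rintro ⟨m, b⟩ hq hb
            exact h2 (List.mem_map.mpr ⟨(m, b), hq, by simpa using hb⟩)
          have hids : pvIds n ps = [] := by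
            unfold pvIds
            rw [hfilter]
            rfl
          have hcount : List.count n ((PySem.Set.ofList ps).map Prod.fst) = 0 :=
            List.count_eq_zero.mpr hnnames
          simp [hids, hcount, PySem.Set.add, PySem.Set.contains]

-- ===== VERDICT (by name: the statement is the Claim_ definition above) =====
theorem find_pathway_overlaps_spec : Claim_equal_find_pathway_overlaps := by
  intro pd _hdom hpre
  unfold Spec_find_pathway_overlaps find_pathway_overlaps find_pathway_overlaps_alt
  unfold Pre_find_pathway_overlaps at hpre
  cases h : (PySem.Dict.mk pd).get? "result" with
  | none => simp
  | some result =>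
    simp only [h, Option.getD_some, List.all_eq_true] at hpre
    simp only []
    have hstep : result.foldl
        (fun (d : PySem.Dict String (PySem.Set String)) pathway =>
          match (PySem.Dict.mk pathway).get? "pathwayName", (PySem.Dict.mk pathway).get? "inputId" with
          | some name, some analyte_id => d.insert name (PySem.Set.add (d.getD name []) analyte_id)
          | _, _ => d) PySem.Dict.empty
        = (result.map (fun pathway =>
            match (PySem.Dict.mk pathway).get? "pathwayName" with
            | some name =>
              match (PySem.Dict.mk pathway).get? "inputId" with
              | some analyte_id => (name, analyte_id)
              | none => ("", "")
            | none => ("", ""))).foldl pvStepA PySem.Dict.empty := by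
      rw [List.foldl_map]
      apply PySem.List.foldl_congr_mem
      intro d pw hpw
      have hk := hpre pw hpw
      have hn : ((PySem.Dict.mk pw).get? "pathwayName").isSome := by
        rw [← PySem.Dict.contains_eq_isSome_get?]; exact ((Bool.and_eq_true _ _).mp hk).1
      have ha : ((PySem.Dict.mk pw).get? "inputId").isSome := by
        rw [← PySem.Dict.contains_eq_isSome_get?]; exact ((Bool.and_eq_true _ _).mp hk).2
      obtain ⟨name, hgn⟩ := Option.isSome_iff_exists.mp hn
      obtain ⟨aid, hga⟩ := Option.isSome_iff_exists.mp ha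
      simp [hgn, hga, pvStepA]
    rw [hstep, pv_foldA_group, pv_main, PySem.Dict.items_counter, PySem.List.dedup_eq_ofList]
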